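-- pv_equiv track=rewrite | github.com/runshengdu/agentic_eval | review/review.py | extract_log_summary
-- ===== SOURCE A (Python) =====
-- from typing import Dict, List, Optional, Tuple
--
-- def extract_log_summary(log_entries: List[Dict]) -> Tuple[Optional[str], Optional[str]]:
--     """Get (user_query, final_answer) from legacy-style log entries."""
--     user_query: Optional[str] = None
--     answer: Optional[str] = None
--     for it in log_entries:
--         t = (it.get("type") or "").lower()
--         if t == "user_query" and not user_query:
--             user_query = (it.get("content") or "").strip()
--         elif t == "answer" and not answer:
--             answer = (it.get("content") or "").strip()
--         # Early exit if both found
--         if user_query and answer: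
--             break
--     return user_query, answer
-- ===== SOURCE B (Python) =====
-- from typing import Dict, List, Optional, Tuple
--
-- def extract_log_summary(log_entries: List[Dict]) -> Tuple[Optional[str], Optional[str]]:
--     """Get (user_query, final_answer) from legacy-style log entries."""
--     def find(kind: str) -> Optional[str]:
--         fallback: Optional[str] = None
--         for it in log_entries:
--             if (it.get("type") or "").lower() == kind:
--                 c = (it.get("content") or "").strip()
--                 if c:
--                     return c
--                 fallback = ""
--         return fallback
--     return find("user_query"), find("answer")
-- ===== Notes on version B (the rewrite author's own statement) =====
-- stated objective: simpler
-- what changed: Replaces the single interleaved loop over two Optional accumulators with early exit by one focused helper find(kind) run twice: it returns the first non-empty stripped content of that kind, '' if such entries exist but are all empty, None otherwise.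
import Mathlib
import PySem

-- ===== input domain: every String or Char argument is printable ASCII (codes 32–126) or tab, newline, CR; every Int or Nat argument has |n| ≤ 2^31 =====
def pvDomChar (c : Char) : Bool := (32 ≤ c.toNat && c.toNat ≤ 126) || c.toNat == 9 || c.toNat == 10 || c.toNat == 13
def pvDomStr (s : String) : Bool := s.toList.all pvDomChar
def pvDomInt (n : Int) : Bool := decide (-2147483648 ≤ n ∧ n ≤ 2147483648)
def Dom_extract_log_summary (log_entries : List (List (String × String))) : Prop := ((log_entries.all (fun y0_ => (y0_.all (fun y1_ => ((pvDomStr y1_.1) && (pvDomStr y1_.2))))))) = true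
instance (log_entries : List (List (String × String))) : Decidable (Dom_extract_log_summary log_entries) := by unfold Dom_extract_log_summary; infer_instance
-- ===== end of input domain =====

-- B replaces A's interleaved two-accumulator loop with early exit by one focused
-- helper find(kind) run twice (objective: simpler decomposition, same O(n) cost).

-- ===== PORT A =====
-- Python truthiness of an Optional[str]: None and "" are falsy.
def pyTruthy : Option String → Bool
  | none => false
  | some s => s != ""

-- (it.get(k) or ""): values are strings, so `or ""` maps both None and "" to "" = getD "".
def pvGetS (it : List (String × String)) (k : String) : String :=
  ((PySem.Dict.mk it).get? k).getD ""

def pvLoopA : List (List (String × String)) → Option String → Option String → Option String × Option String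
  | [], uq, ans => (uq, ans)
  | it :: rest, uq, ans =>
    let t := PySem.Str.lower (pvGetS it "type")
    let p :=
      if t == "user_query" && !pyTruthy uq then
        (some (PySem.Str.strip (pvGetS it "content")), ans)
      else if t == "answer" && !pyTruthy ans then
        (uq, some (PySem.Str.strip (pvGetS it "content")))
      else (uq, ans)
    if pyTruthy p.1 && pyTruthy p.2 then p else pvLoopA rest p.1 p.2

def extract_log_summary (log_entries : List (List (String × String))) : Option String × Option String :=
  pvLoopA log_entries none none

-- ===== PORT B =====
def pvFind (kind : String) : List (List (String × String)) → Option String → Option String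
  | [], fb => fb
  | it :: rest, fb =>
    if PySem.Str.lower (pvGetS it "type") == kind then
      let c := PySem.Str.strip (pvGetS it "content")
      if c == "" then pvFind kind rest (some "") else some c
    else pvFind kind rest fb

def extract_log_summary_alt (log_entries : List (List (String × String))) : Option String × Option String :=
  (pvFind "user_query" log_entries none, pvFind "answer" log_entries none)

-- ===== PRECONDITION & SPEC =====
def Spec_extract_log_summary (log_entries : List (List (String × String))) (out : Option String × Option String) : Prop := out = extract_log_summary_alt log_entries
instance (log_entries : List (List (String × String))) (out : Option String × Option String) : Decidable (Spec_extract_log_summary log_entries out) := by unfold Spec_extract_log_summary; infer_instance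

-- ===== CLAIM (what is proved, stated in full; the proofs are below) =====
def Claim_equal_extract_log_summary : Prop := ∀ (log_entries : List (List (String × String))), Dom_extract_log_summary log_entries → Spec_extract_log_summary log_entries (extract_log_summary log_entries)

-- ===== LEMMAS AND PROOFS =====
-- state resolver: a truthy accumulator is final; otherwise the focused scan continues from it
def pvG (kind : String) (l : List (List (String × String))) (st : Option String) : Option String :=
  if pyTruthy st then st else pvFind kind l st

theorem pyTruthy_some (s : String) : pyTruthy (some s) = (s != "") := rfl

theorem pvG_cons (kind : String) (it : List (String × String))
    (rest : List (List (String × String))) (st : Option String) :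
    pvG kind (it :: rest) st =
      if PySem.Str.lower (pvGetS it "type") = kind ∧ pyTruthy st = false then
        (if PySem.Str.strip (pvGetS it "content") = "" then pvG kind rest (some "")
         else some (PySem.Str.strip (pvGetS it "content")))
      else pvG kind rest st := by
  by_cases hs : pyTruthy st
  · simp [pvG, hs]
  · by_cases hk : PySem.Str.lower (pvGetS it "type") = kind
    · by_cases hc : PySem.Str.strip (pvGetS it "content") = ""
      · simp [pvG, hs, hk, hc, pvFind, pyTruthy_some]
      · simp [pvG, hs, hk, hc, pvFind]
    · simp [pvG, hs, hk, pvFind]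

theorem pvLoopA_eq_pvG : ∀ (l : List (List (String × String))) (uq ans : Option String),
    pvLoopA l uq ans = (pvG "user_query" l uq, pvG "answer" l ans) := by
  intro l
  induction l with
  | nil =>
    intro uq ans
    simp [pvLoopA, pvG, pvFind]
  | cons it rest ih =>
    intro uq ans
    rw [pvG_cons, pvG_cons]
    by_cases hqa : PySem.Str.lower (pvGetS it "type") = "user_query" ∧
        PySem.Str.lower (pvGetS it "type") = "answer"
    · exact absurd (hqa.1 ▸ hqa.2) (by decide)
    · simp only [pvLoopA]
      by_cases hq : PySem.Str.lower (pvGetS it "type") = "user_query" <;>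
      by_cases ha : PySem.Str.lower (pvGetS it "type") = "answer" <;>
      by_cases huq : pyTruthy uq <;>
      by_cases hans : pyTruthy ans <;>
      by_cases hce : PySem.Str.strip (pvGetS it "content") = "" <;>
      simp_all [ih, pvG, pyTruthy_some]

-- ===== VERDICT (by name: the statement is the Claim_ definition above) =====
theorem extract_log_summary_spec : Claim_equal_extract_log_summary := by
  intro l _
  show extract_log_summary l = extract_log_summary_alt l
  simp [extract_log_summary, extract_log_summary_alt, pvLoopA_eq_pvG, pvG, pyTruthy]
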